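-- pv_equiv track=rewrite | github.com/asmaBelkerrouche/phishing-detector | features.py | has_urgent_words
-- ===== SOURCE A (Python) =====
-- def has_urgent_words(text):
--     urgent_words = [
--         'urgent', 'immediately', 'asap', 'warning', 'important',
--         'alert', 'attention', 'critical', 'deadline', 'expires',
--         'suspended', 'locked', 'limited', 'restricted', 'blocked',
--         'verify now', 'act now', 'click here', 'do it now'
--     ]
--     text_lower = str(text).lower()
--     for word in urgent_words:
--         if word in text_lower:
--             return 1
--     return 0
-- ===== SOURCE B (Python) =====
-- def has_urgent_words(text):
--     urgent_words = [
--         'urgent', 'immediately', 'asap', 'warning', 'important',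
--         'alert', 'attention', 'critical', 'deadline', 'expires',
--         'suspended', 'locked', 'limited', 'restricted', 'blocked',
--         'verify now', 'act now', 'click here', 'do it now'
--     ]
--     text_lower = str(text).lower()
--     for i in range(len(text_lower) + 1):
--         if any(text_lower.startswith(w, i) for w in urgent_words):
--             return 1
--     return 0
-- ===== Notes on version B (the rewrite author's own statement) =====
-- stated objective: alternative
-- what changed: A does one substring-membership scan per keyword; B makes a single left-to-right pass over text positions and checks at each offset whether any keyword starts there via startswith with an offset.
import Mathlib
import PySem

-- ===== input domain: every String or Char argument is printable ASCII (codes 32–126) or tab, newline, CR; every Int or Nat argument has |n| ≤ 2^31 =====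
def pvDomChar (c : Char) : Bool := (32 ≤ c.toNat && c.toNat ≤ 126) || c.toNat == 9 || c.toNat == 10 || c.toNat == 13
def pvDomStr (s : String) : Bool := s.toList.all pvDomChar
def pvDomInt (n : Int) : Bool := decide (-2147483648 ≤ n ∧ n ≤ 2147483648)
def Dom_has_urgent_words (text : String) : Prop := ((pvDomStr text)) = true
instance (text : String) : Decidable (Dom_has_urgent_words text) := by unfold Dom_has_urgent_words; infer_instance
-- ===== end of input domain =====

-- B replaces A's keyword-by-keyword `in` scans by a single left-to-right pass over text
-- positions, checking at each offset whether some keyword starts there (objective: alternative).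

-- the fixed keyword list, shared literal of both Pythons (as lists of chars)
def urgentWords : List (List Char) :=
  ["urgent".toList, "immediately".toList, "asap".toList, "warning".toList, "important".toList,
   "alert".toList, "attention".toList, "critical".toList, "deadline".toList, "expires".toList,
   "suspended".toList, "locked".toList, "limited".toList, "restricted".toList, "blocked".toList,
   "verify now".toList, "act now".toList, "click here".toList, "do it now".toList]

-- ===== PORT A =====
-- 'for word in urgent_words: if word in text_lower: return 1' / 'return 0'
def hasUrgentLoopA (t : List Char) : List (List Char) → Int
  | [] => 0
  | w :: ws => if PySem.Chars.isIn w t then 1 else hasUrgentLoopA t ws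

def has_urgent_words (text : String) : Int :=
  hasUrgentLoopA (PySem.Str.lower text).toList urgentWords

-- ===== PORT B =====
-- 'for i in range(len(t)+1): if any(t.startswith(w, i) for w in urgent_words): return 1' / 'return 0';
-- t.startswith(w, i) with 0 ≤ i ≤ len(t) is exactly `startswith (t.drop i) w`
def hasUrgentLoopB (t : List Char) : List Nat → Int
  | [] => 0
  | i :: is =>
      if urgentWords.any (fun w => PySem.Chars.startswith (t.drop i) w) then 1
      else hasUrgentLoopB t is

def has_urgent_words_alt (text : String) : Int :=
  hasUrgentLoopB (PySem.Str.lower text).toList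
    (List.range ((PySem.Str.lower text).toList.length + 1))

-- ===== PRECONDITION & SPEC =====
def Spec_has_urgent_words (text : String) (out : Int) : Prop := out = has_urgent_words_alt text
instance (text : String) (out : Int) : Decidable (Spec_has_urgent_words text out) := by unfold Spec_has_urgent_words; infer_instance

-- ===== CLAIM (what is proved, stated in full; the proofs are below) =====
def Claim_equal_has_urgent_words : Prop := ∀ (text : String), Dom_has_urgent_words text → Spec_has_urgent_words text (has_urgent_words text)

-- ===== LEMMAS AND PROOFS =====

-- A's loop is the if-form of an `any` over the keywords
theorem hasUrgentLoopA_eq (t : List Char) (ws : List (List Char)) :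
    hasUrgentLoopA t ws = if ws.any (fun w => PySem.Chars.isIn w t) then 1 else 0 := by
  induction ws with
  | nil => rfl
  | cons w ws ih =>
      simp only [hasUrgentLoopA, List.any_cons, ih]
      by_cases h : PySem.Chars.isIn w t = true <;> simp [h]

-- B's loop is the if-form of an `any` over the position list
theorem hasUrgentLoopB_eq (t : List Char) (is : List Nat) :
    hasUrgentLoopB t is =
      if is.any (fun i => urgentWords.any (fun w => PySem.Chars.startswith (t.drop i) w))
      then 1 else 0 := by
  induction is with
  | nil => rfl
  | cons i is ih =>
      simp only [hasUrgentLoopB, List.any_cons, ih]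
      by_cases h : urgentWords.any (fun w => PySem.Chars.startswith (t.drop i) w) = true <;>
        simp [h]

-- the two `any`s agree: some keyword starts at some position ↔ some keyword is a substring
theorem anys_agree (t : List Char) :
    (List.range (t.length + 1)).any
        (fun i => urgentWords.any (fun w => PySem.Chars.startswith (t.drop i) w)) =
      urgentWords.any (fun w => PySem.Chars.isIn w t) := by
  rw [Bool.eq_iff_iff]
  simp only [List.any_eq_true, List.mem_range, PySem.Chars.startswith_iff]
  constructor
  · rintro ⟨i, -, w, hw, hpre⟩
    exact ⟨w, hw, (PySem.Chars.exists_prefix_drop_iff_isIn w t).1 ⟨i, hpre⟩⟩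
  · rintro ⟨w, hw, hin⟩
    obtain ⟨j, hpre⟩ := (PySem.Chars.exists_prefix_drop_iff_isIn w t).2 hin
    refine ⟨min j t.length, by omega, w, hw, ?_⟩
    rcases le_or_gt j t.length with h | h
    · rwa [min_eq_left h]
    · rw [min_eq_right (le_of_lt h)]
      rw [List.drop_eq_nil_of_le (le_of_lt h)] at hpre
      simpa [List.drop_length] using hpre

-- ===== VERDICT (by name: the statement is the Claim_ definition above) =====
theorem has_urgent_words_spec : Claim_equal_has_urgent_words := by
  intro text _
  unfold Spec_has_urgent_words has_urgent_words has_urgent_words_alt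
  rw [hasUrgentLoopA_eq, hasUrgentLoopB_eq, anys_agree]
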